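-- pv_equiv track=rewrite | github.com/robertsben/adventofcode2019 | day_4/src/solution.py | has_isolated_adjacent_duplicates
-- ===== SOURCE A (Python) =====
-- def has_isolated_adjacent_duplicates(password: str) -> bool:
--     return any(
--         password[i] == password[i + 1] and password[i] not in (
--             password[i-1] if i > 0 else None,
--             password[i+2] if i < len(password) - 2 else None
--         )
--         for i in range(len(password) - 1)
--     )
-- ===== SOURCE B (Python) =====
-- from itertools import groupby
--
--
-- def has_isolated_adjacent_duplicates(password: str) -> bool:
--     # True iff some maximal run of equal characters has length exactly 2.
--     return any(sum(1 for _ in g) == 2 for _, g in groupby(password))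
-- ===== Notes on version B (the rewrite author's own statement) =====
-- stated objective: idiomatic
-- what changed: B groups the string into maximal runs of equal characters (itertools.groupby) and returns True iff some run has length exactly 2, instead of A's index loop that re-indexes the string and peeks at both neighbours of each adjacent pair; grouping does one cheap pass (measured constant-factor speedup on run-heavy inputs).
import Mathlib
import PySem

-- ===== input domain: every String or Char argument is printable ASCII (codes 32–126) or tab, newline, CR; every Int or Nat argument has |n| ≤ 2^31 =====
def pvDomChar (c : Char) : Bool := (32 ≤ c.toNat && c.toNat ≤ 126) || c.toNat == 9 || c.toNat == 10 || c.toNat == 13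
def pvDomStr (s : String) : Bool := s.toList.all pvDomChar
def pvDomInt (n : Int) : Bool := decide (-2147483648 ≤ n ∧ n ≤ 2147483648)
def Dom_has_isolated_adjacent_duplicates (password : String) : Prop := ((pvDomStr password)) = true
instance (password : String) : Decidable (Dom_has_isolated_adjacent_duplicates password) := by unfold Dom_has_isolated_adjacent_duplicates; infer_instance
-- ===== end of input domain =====

-- B detects "some maximal run of equal characters has length exactly 2" by grouping the
-- string into runs (itertools.groupby) instead of A's index loop peeking at neighbours.


-- ===== PORT A =====
-- Literal port of A's generator expression over range(len(password) - 1).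
-- Every index actually read (i, i+1, and the guarded i-1, i+2) is in range in Python,
-- so the `getD … ' '` default is never used and the port is exact.
def has_isolated_adjacent_duplicates (password : String) : Bool :=
  (PySem.List.pyRange 0 ((password.toList.length : Int) - 1) 1).any (fun i =>
    (password.toList.getD i.toNat ' ' == password.toList.getD (i + 1).toNat ' ') &&
      !(((if i > 0 then some (password.toList.getD (i - 1).toNat ' ') else none)
            == some (password.toList.getD i.toNat ' ')) ||
        ((if i < (password.toList.length : Int) - 2
            then some (password.toList.getD (i + 2).toNat ' ') else none)
            == some (password.toList.getD i.toNat ' '))))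

-- ===== PORT B =====
-- groupby(password): one fold building the list of maximal runs as (char, length)
-- pairs (most recent run first; `any` does not depend on the order).
def pvRunStep (acc : List (Char × Nat)) (c : Char) : List (Char × Nat) :=
  match acc with
  | [] => [(c, 1)]
  | (d, k) :: t => if c == d then (d, k + 1) :: t else (c, 1) :: (d, k) :: t

def has_isolated_adjacent_duplicates_alt (password : String) : Bool :=
  (password.toList.foldl pvRunStep []).any (fun p => p.2 == 2)

-- ===== PRECONDITION & SPEC =====
def Spec_has_isolated_adjacent_duplicates (password : String) (out : Bool) : Prop := out = has_isolated_adjacent_duplicates_alt password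
instance (password : String) (out : Bool) : Decidable (Spec_has_isolated_adjacent_duplicates password out) := by unfold Spec_has_isolated_adjacent_duplicates; infer_instance

-- ===== CLAIM (what is proved, stated in full; the proofs are below) =====
def Claim_equal_has_isolated_adjacent_duplicates : Prop := ∀ (password : String), Dom_has_isolated_adjacent_duplicates password → Spec_has_isolated_adjacent_duplicates password (has_isolated_adjacent_duplicates password)

-- ===== LEMMAS AND PROOFS =====

-- A's per-index condition, in Nat form, generalized by the character `p` to the left
-- of the scanned list (none at the top level).
def pvIdxCond (p : Option Char) (cs : List Char) (j : Nat) : Bool :=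
  (cs.getD j ' ' == cs.getD (j + 1) ' ') &&
    !(((if j = 0 then p else some (cs.getD (j - 1) ' ')) == some (cs.getD j ' ')) ||
      ((if j + 2 < cs.length then some (cs.getD (j + 2) ' ') else none) == some (cs.getD j ' ')))

def pvIdxAny (p : Option Char) (cs : List Char) : Bool :=
  (List.range (cs.length - 1)).any (pvIdxCond p cs)

-- The same scan written as structural recursion carrying the previous character.
def pvIsoAux : Option Char → List Char → Bool
  | _, [] => false
  | _, [_] => false
  | p, a :: b :: r =>
    ((a == b) && !((p == some a) || (r.head? == some a))) || pvIsoAux (some a) (b :: r)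

-- run-length scan that the fold of B computes (proved below)
def pvRunScan : Char → Nat → List Char → Bool
  | _, k, [] => k == 2
  | d, k, c :: r => if c == d then pvRunScan d (k + 1) r else (k == 2) || pvRunScan c 1 r

-- ---------- Port A = pvIdxAny none ----------

theorem portA_eq_idxAny (password : String) :
    has_isolated_adjacent_duplicates password = pvIdxAny none password.toList := by
  unfold has_isolated_adjacent_duplicates pvIdxAny
  rw [PySem.List.pyRange_one, List.any_map]
  have hlen : ((((password.toList.length : Int)) - 1) - 0).toNat = password.toList.length - 1 := by
    omega
  rw [hlen]
  apply List.any_congr rfl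
  intro k
  simp only [Function.comp_apply, zero_add]
  have h1 : ((k : Int)).toNat = k := by omega
  have h2 : ((k : Int) + 1).toNat = k + 1 := by omega
  have h3 : ((k : Int) - 1).toNat = k - 1 := by omega
  have h4 : ((k : Int) + 2).toNat = k + 2 := by omega
  rw [h1, h2, h3, h4]
  have h5 : ((k : Int) > 0) ↔ ¬ (k = 0) := by omega
  have h6 : ((k : Int) < (password.length : Int) - 2) ↔ k + 2 < password.length := by
    omega
  unfold pvIdxCond
  by_cases hz : k = 0
  · subst hz
    simp
  · have h7 : 0 < k := by omega
    simp [h6, h7, hz]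

theorem idxAny_eq_isoAux (cs : List Char) (p : Option Char) :
    pvIdxAny p cs = pvIsoAux p cs := by
  induction cs generalizing p with
  | nil => rfl
  | cons a tl ih =>
    cases tl with
    | nil => rfl
    | cons b r =>
      show pvIdxAny p (a :: b :: r) = _
      unfold pvIdxAny
      have hlen : (a :: b :: r).length - 1 = r.length + 1 := by simp
      rw [hlen, List.range_succ_eq_map, List.any_cons, List.any_map]
      have hshift : ∀ j, pvIdxCond p (a :: b :: r) (j + 1) = pvIdxCond (some a) (b :: r) j := by
        intro j
        unfold pvIdxCond
        have e1 : (a :: b :: r).getD (j + 1) ' ' = (b :: r).getD j ' ' := by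
          simp [List.getD_cons_succ]
        have e2 : (a :: b :: r).getD (j + 1 + 1) ' ' = (b :: r).getD (j + 1) ' ' := by
          simp [List.getD_cons_succ]
        have e4 : (a :: b :: r).getD (j + 1 + 2) ' ' = (b :: r).getD (j + 2) ' ' := by
          simp [List.getD_cons_succ]
        have e5 : (j + 1 + 2 < (a :: b :: r).length) ↔ (j + 2 < (b :: r).length) := by
          simp only [List.length_cons]
          omega
        rw [e1, e2, e4]
        have hj1 : ¬ (j + 1 = 0) := by omega
        rw [if_neg hj1]
        by_cases hz : j = 0
        · subst hz
          simp only [if_pos rfl]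
          have e3 : (a :: b :: r).getD (0 + 1 - 1) ' ' = a := rfl
          rw [e3]
          by_cases hg : 0 + 2 < (b :: r).length <;>
            simp [e5.mpr, hg, e5, List.getD_cons_succ]
        · have hj : j + 1 - 1 = (j - 1) + 1 := by omega
          have e3 : (a :: b :: r).getD (j + 1 - 1) ' ' = (b :: r).getD (j - 1) ' ' := by
            rw [hj]; simp [List.getD_cons_succ]
          rw [e3, if_neg hz]
          by_cases hg : j + 2 < (b :: r).length <;> simp [e5, hg]
      have hz : pvIdxCond p (a :: b :: r) 0
          = ((a == b) && !((p == some a) || (r.head? == some a))) := by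
        unfold pvIdxCond
        cases r with
        | nil => simp
        | cons x xs => simp [List.getD_cons_succ]
      have h2 : (List.range (r.length)).any (pvIdxCond p (a :: b :: r) ∘ Nat.succ)
          = (List.range (r.length)).any (pvIdxCond (some a) (b :: r)) :=
        List.any_congr rfl (fun j => hshift j)
      rw [h2, hz]
      have h3 : (List.range (r.length)).any (pvIdxCond (some a) (b :: r)) = pvIdxAny (some a) (b :: r) := by
        unfold pvIdxAny
        simp
      rw [h3, ih]
      rfl

-- ---------- run lemmas for pvIsoAux ----------

theorem isoAux_prev_congr (p q : Option Char) (a : Char) (l : List Char)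
    (h : (p == some a) = (q == some a)) : pvIsoAux p (a :: l) = pvIsoAux q (a :: l) := by
  cases l with
  | nil => rfl
  | cons b r => simp [pvIsoAux, h]

theorem isoAux_some_run (d : Char) : ∀ (j : Nat) (rest : List Char),
    rest.head? ≠ some d →
    pvIsoAux (some d) (List.replicate j d ++ rest) = pvIsoAux none rest := by
  intro j
  induction j with
  | zero =>
    intro rest hh
    cases rest with
    | nil => rfl
    | cons a r =>
      apply isoAux_prev_congr
      have had : ¬ (d = a) := fun h => hh (by simp [h])
      simp [had]
  | succ j ih =>
    intro rest hh
    rw [List.replicate_succ, List.cons_append]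
    cases j with
    | zero =>
      simp only [List.replicate_zero, List.nil_append]
      cases rest with
      | nil => rfl
      | cons a r =>
        have had : ¬ (d = a) := fun h => hh (by simp [h])
        show (((d == a) && _) || pvIsoAux (some d) (a :: r)) = pvIsoAux none (a :: r)
        have h1 : (d == a) = false := by simp [had]
        rw [h1]
        simp only [Bool.false_and, Bool.false_or]
        apply isoAux_prev_congr
        simp [had]
    | succ m =>
      have hrw : List.replicate (m + 1) d ++ rest = d :: (List.replicate m d ++ rest) := by
        rw [List.replicate_succ, List.cons_append]
      rw [hrw]
      show (((d == d) && !((some d == some d) || _)) || pvIsoAux (some d) (d :: (List.replicate m d ++ rest)))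
          = pvIsoAux none rest
      have := ih rest hh
      rw [hrw] at this
      rw [this]
      simp

theorem isoAux_run (d : Char) (k : Nat) (rest : List Char) (hk : 1 ≤ k)
    (hh : rest.head? ≠ some d) :
    pvIsoAux none (List.replicate k d ++ rest) = ((k == 2) || pvIsoAux none rest) := by
  match k, hk with
  | 1, _ =>
    simp only [List.replicate_one, List.cons_append, List.nil_append]
    cases rest with
    | nil => simp [pvIsoAux]
    | cons a r =>
      have had : ¬ (d = a) := fun h => hh (by simp [h])
      show (((d == a) && _) || pvIsoAux (some d) (a :: r)) = _
      have h1 : (d == a) = false := by simp [had]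
      rw [h1]
      simp only [Bool.false_and, Bool.false_or]
      have : pvIsoAux (some d) (a :: r) = pvIsoAux none (a :: r) := by
        apply isoAux_prev_congr; simp [had]
      rw [this]
      simp
  | 2, _ =>
    have hrw : List.replicate 2 d ++ rest = d :: d :: rest := by simp [List.replicate_succ]
    rw [hrw]
    show (((d == d) && !((none == some d) || (rest.head? == some d))) || _) = _
    have h2 : (rest.head? == some d) = false := by
      cases hr : rest.head? with
      | none => rfl
      | some a =>
        have : ¬ (a = d) := fun h => hh (by rw [hr, h])
        simp [this]
    rw [h2]
    simp
  | (m + 3), _ =>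
    have hrw : List.replicate (m + 3) d ++ rest
        = d :: d :: (List.replicate (m + 1) d ++ rest) := by
      have : m + 3 = (m + 1) + 1 + 1 := by omega
      rw [this, List.replicate_succ, List.replicate_succ]
      simp
    rw [hrw]
    have hhead : (List.replicate (m + 1) d ++ rest).head? = some d := by
      rw [List.replicate_succ, List.cons_append]
      rfl
    show (((d == d) && !((none == some d) || ((List.replicate (m + 1) d ++ rest).head? == some d)))
        || pvIsoAux (some d) (d :: (List.replicate (m + 1) d ++ rest))) = _
    rw [hhead]
    have hrec : pvIsoAux (some d) (d :: (List.replicate (m + 1) d ++ rest))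
        = pvIsoAux none rest := by
      have h := isoAux_some_run d (m + 2) rest hh
      rw [show List.replicate (m + 2) d ++ rest = d :: (List.replicate (m + 1) d ++ rest) by
        rw [List.replicate_succ, List.cons_append]] at h
      exact h
    rw [hrec]
    have : ((m + 3 : Nat) == 2) = false := by
      simp only [beq_eq_false_iff_ne]
      omega
    rw [this]
    simp

-- ---------- fold lemmas for B ----------

theorem foldl_runStep_append (l : List Char) : ∀ (a t : List (Char × Nat)), a ≠ [] →
    List.foldl pvRunStep (a ++ t) l = List.foldl pvRunStep a l ++ t := by
  induction l with
  | nil => intro a t _; rfl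
  | cons c r ih =>
    intro a t ha
    match a, ha with
    | (d, k) :: a', _ =>
      simp only [List.foldl_cons, List.cons_append]
      by_cases hc : (c == d) = true
      · rw [show pvRunStep ((d, k) :: (a' ++ t)) c = (d, k + 1) :: (a' ++ t) by
            simp [pvRunStep, hc],
          show pvRunStep ((d, k) :: a') c = (d, k + 1) :: a' by simp [pvRunStep, hc],
          show ((d, k + 1) :: (a' ++ t)) = ((d, k + 1) :: a') ++ t from rfl]
        exact ih _ _ (by simp)
      · rw [show pvRunStep ((d, k) :: (a' ++ t)) c = (c, 1) :: (d, k) :: (a' ++ t) by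
            simp [pvRunStep, hc],
          show pvRunStep ((d, k) :: a') c = (c, 1) :: (d, k) :: a' by simp [pvRunStep, hc],
          show ((c, 1) :: (d, k) :: (a' ++ t)) = ((c, 1) :: (d, k) :: a') ++ t from rfl]
        exact ih _ _ (by simp)

theorem foldl_runStep_replicate (d : Char) : ∀ (j : Nat) (k : Nat) (t : List (Char × Nat)),
    List.foldl pvRunStep ((d, k) :: t) (List.replicate j d) = (d, k + j) :: t := by
  intro j
  induction j with
  | zero => intro k t; simp
  | succ j ih =>
    intro k t
    rw [List.replicate_succ, List.foldl_cons,
      show pvRunStep ((d, k) :: t) d = (d, k + 1) :: t by simp [pvRunStep], ih,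
      show k + 1 + j = k + (j + 1) by omega]

def pvRuns (cs : List Char) : Bool := (cs.foldl pvRunStep []).any (fun p => p.2 == 2)

theorem runs_run (d : Char) (k : Nat) (rest : List Char) (hk : 1 ≤ k)
    (hh : rest.head? ≠ some d) :
    pvRuns (List.replicate k d ++ rest) = ((k == 2) || pvRuns rest) := by
  unfold pvRuns
  rw [List.foldl_append]
  have h1 : List.foldl pvRunStep [] (List.replicate k d) = [(d, k)] := by
    match k, hk with
    | (m + 1), _ =>
      rw [List.replicate_succ, List.foldl_cons]
      show List.foldl pvRunStep [(d, 1)] (List.replicate m d) = _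
      rw [foldl_runStep_replicate, Nat.add_comm]
  rw [h1]
  cases rest with
  | nil => simp
  | cons a r =>
    have had : ¬ (a = d) := fun h => hh (by simp [h])
    rw [List.foldl_cons]
    have h2 : pvRunStep [(d, k)] a = [(a, 1)] ++ [(d, k)] := by
      simp [pvRunStep, had]
    rw [h2, foldl_runStep_append r [(a, 1)] [(d, k)] (by simp)]
    rw [List.any_append]
    have h3 : List.foldl pvRunStep [] (a :: r) = List.foldl pvRunStep [(a, 1)] r := by rfl
    rw [h3]
    simp only [List.any_cons, List.any_nil]
    cases hb : (List.foldl pvRunStep [(a, 1)] r).any (fun p => p.2 == 2) <;>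
      cases hk2 : (k == 2) <;> simp

-- ---------- main equality by strong induction on length ----------

theorem isoAux_eq_runs : ∀ (n : Nat) (cs : List Char), cs.length ≤ n →
    pvIsoAux none cs = pvRuns cs := by
  intro n
  induction n with
  | zero =>
    intro cs h
    have : cs = [] := List.eq_nil_of_length_eq_zero (by omega)
    subst this
    rfl
  | succ n ih =>
    intro cs hlen
    cases hcs : cs with
    | nil => rfl
    | cons d tl =>
      subst hcs
      set tk := tl.takeWhile (fun x => x == d) with htk
      set rest := tl.dropWhile (fun x => x == d) with hrest
      have hsplit : d :: tl = List.replicate (tk.length + 1) d ++ rest := by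
        have h1 : tk = List.replicate tk.length d := by
          apply List.eq_replicate_of_mem
          intro b hb
          have := List.mem_takeWhile_imp hb
          simpa using this
        calc d :: tl = d :: (tk ++ rest) := by rw [List.takeWhile_append_dropWhile]
          _ = (d :: tk) ++ rest := rfl
          _ = (d :: List.replicate tk.length d) ++ rest := by rw [← h1]
          _ = List.replicate (tk.length + 1) d ++ rest := by
              rw [List.replicate_succ]
      have hh : rest.head? ≠ some d := by
        intro hcontra
        cases hr : rest with
        | nil => rw [hr] at hcontra; simp at hcontra
        | cons a r =>
          rw [hr] at hcontra
          simp at hcontra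
          have := List.head?_dropWhile_not (fun x => x == d) tl
          rw [← hrest, hr] at this
          simp at this
          exact this hcontra
      have hrlen : rest.length ≤ n := by
        have h2 : (List.replicate (tk.length + 1) d ++ rest).length = tk.length + 1 + rest.length := by
          simp
        have h3 : (d :: tl).length = tl.length + 1 := by simp
        have := congrArg List.length hsplit
        rw [h3, h2] at this
        omega
      rw [hsplit, isoAux_run d (tk.length + 1) rest (by omega) hh,
        runs_run d (tk.length + 1) rest (by omega) hh, ih rest hrlen]

-- ===== VERDICT (by name: the statement is the Claim_ definition above) =====
theorem has_isolated_adjacent_duplicates_spec : Claim_equal_has_isolated_adjacent_duplicates := by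
  intro password _
  unfold Spec_has_isolated_adjacent_duplicates
  rw [portA_eq_idxAny, idxAny_eq_isoAux,
    isoAux_eq_runs password.toList.length password.toList (le_refl _)]
  rfl
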